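-- pv_equiv track=rewrite | github.com/isChenXuan/AWI | weldUtils.py | mergeList
-- ===== SOURCE A (Python) =====
-- def mergeList(list1, list2):
--     """
--     # Merge two lists which have common items in inner list. Inner list should be quite different from each other.
--     # For example:
--     #       list1 = [[1,2,3],  list2 = [[3,10,11],  then mergList = [[1,2,3,10,11],
--     #                [4,5,6],           [9,12,13],                   [4,5,6,14,15],
--     #                [7,8,9]]           [6,14,15]]                   [7,8,9,12,13]].
--     # Inputs:
--     #        Two lists.
--     # Outputs:
--     #        One list.
--     """
--     if not len(list1):  # List1 is empty.
--         return list2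
--     elif not len(list2): # List2 is empty.
--         return list1
--     else:
--         mergList = []
--         for lst1 in list1:
--             # Search inner lists which have common items.
--             for lst2 in list2:
--                 if any([i in lst1 for i in lst2]):
--                     lst1 = lst1 + lst2
--             # Remove duplicated items.
--             tmp = []
--             for item in lst1:
--                 if item not in tmp:
--                     tmp.append(item)
--             mergList.append(tmp)
--
--         return mergList
-- ===== SOURCE B (Python) =====
-- def mergeList(list1, list2):
--     if not len(list1):
--         return list2
--     if not len(list2):
--         return list1
--     # Inverted index: item -> indices of list2 rows containing it (built once).
--     idx = {}
--     for j, row in enumerate(list2):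
--         for it in row:
--             idx.setdefault(it, []).append(j)
--     m = len(list2)
--     out = []
--     for lst1 in list1:
--         hit = [False] * m
--         seen = set()
--         merged = []
--
--         def add(item):
--             # First time an item appears, record it and flag every list2 row
--             # containing it; a row merges iff flagged by the time we reach it.
--             if item not in seen:
--                 seen.add(item)
--                 merged.append(item)
--                 for j in idx.get(item, ()):
--                     hit[j] = True
--
--         for it in lst1:
--             add(it)
--         for j in range(m):
--             if hit[j]:
--                 for it in list2[j]:
--                     add(it)
--         out.append(merged)
--     return out
-- ===== Notes on version B (the rewrite author's own statement) =====
-- stated objective: faster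
-- what changed: B builds a one-time inverted index (item -> list2 row indices) and, per list1 row, propagates a boolean hit array and a seen-set: a list2 row is merged iff it was flagged by some already-seen item, eliminating A's repeated membership scans of each list2 row against the growing duplicate-laden row.
import Mathlib
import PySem

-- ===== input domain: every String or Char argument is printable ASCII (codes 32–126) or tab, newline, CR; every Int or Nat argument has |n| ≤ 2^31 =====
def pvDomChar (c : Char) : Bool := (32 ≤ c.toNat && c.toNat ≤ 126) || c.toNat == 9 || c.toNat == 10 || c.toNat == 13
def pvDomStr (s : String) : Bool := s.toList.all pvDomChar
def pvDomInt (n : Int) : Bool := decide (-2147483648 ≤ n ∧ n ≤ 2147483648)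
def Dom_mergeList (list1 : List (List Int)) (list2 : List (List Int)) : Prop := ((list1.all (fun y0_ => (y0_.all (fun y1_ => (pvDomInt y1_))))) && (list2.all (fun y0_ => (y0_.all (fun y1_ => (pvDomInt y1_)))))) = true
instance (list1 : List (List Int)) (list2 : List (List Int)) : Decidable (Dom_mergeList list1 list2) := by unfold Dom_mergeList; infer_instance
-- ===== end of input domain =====

-- B replaces A's per-row membership scans over list2 with a one-time inverted index (item -> rows)
-- plus a boolean hit array: a list2 row merges iff it was flagged by an item seen before reaching it.

-- ===== PORT A =====
def mergeList (list1 : List (List Int)) (list2 : List (List Int)) : List (List Int) :=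
  if list1.length == 0 then list2
  else if list2.length == 0 then list1
  else
    list1.foldl (fun mergList lst1 =>
      -- inner loop: grow lst1 by every lst2 sharing an item
      let l1 := list2.foldl (fun l1 lst2 =>
        if (lst2.map (fun i => l1.contains i)).any id then l1 ++ lst2 else l1) lst1
      -- separate dedup pass
      let tmp := l1.foldl (fun tmp item => if tmp.contains item then tmp else tmp ++ [item]) []
      mergList ++ [tmp]) []

-- ===== PORT B =====
-- idx.setdefault(it, []).append(j)  ==  modify it [] (· ++ [j]); indices from enumerate start at 0
def buildIdx (list2 : List (List Int)) : PySem.Dict Int (List Int) :=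
  (PySem.List.enumerate list2 0).foldl
    (fun d p => p.2.foldl (fun d it => d.modify it [] (· ++ [p.1])) d) PySem.Dict.empty

-- B's `add(item)`: state = (seen, merged, hit). Indices in idx are ≥ 0, so `.toNat` is exact here.
def bAdd (idx : PySem.Dict Int (List Int)) (st : List Int × List Int × List Bool) (item : Int) :
    List Int × List Int × List Bool :=
  if st.1.contains item then st
  else (st.1 ++ [item], st.2.1 ++ [item],
        (idx.getD item []).foldl (fun h j => h.set j.toNat true) st.2.2)

def mergeList_alt (list1 : List (List Int)) (list2 : List (List Int)) : List (List Int) :=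
  if list1.length == 0 then list2
  else if list2.length == 0 then list1
  else
    let idx := buildIdx list2
    let m := list2.length
    list1.foldl (fun out lst1 =>
      let st0 := lst1.foldl (bAdd idx) ([], [], List.replicate m false)
      -- `for j in range(m): if hit[j]: for it in list2[j]: add(it)`; j < m so getD is list2[j]
      let st := (List.range m).foldl (fun st j =>
          if st.2.2.getD j false then (list2.getD j []).foldl (bAdd idx) st else st) st0
      out ++ [st.2.1]) []

-- ===== PRECONDITION & SPEC =====
def Spec_mergeList (list1 : List (List Int)) (list2 : List (List Int)) (out : List (List Int)) : Prop := out = mergeList_alt list1 list2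
instance (list1 : List (List Int)) (list2 : List (List Int)) (out : List (List Int)) : Decidable (Spec_mergeList list1 list2 out) := by unfold Spec_mergeList; infer_instance

-- ===== CLAIM =====
def Claim_equal_mergeList : Prop := ∀ (list1 : List (List Int)) (list2 : List (List Int)), Dom_mergeList list1 list2 → Spec_mergeList list1 list2 (mergeList list1 list2)

-- ===== LEMMAS AND PROOFS =====

-- A's dedup pass, named for the proofs (definitionally A's `tmp` fold)
def addNew (acc : List Int) (xs : List Int) : List Int :=
  xs.foldl (fun tmp item => if tmp.contains item then tmp else tmp ++ [item]) acc

theorem mem_addNew (xs : List Int) : ∀ (acc : List Int) (x : Int),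
    x ∈ addNew acc xs ↔ x ∈ acc ∨ x ∈ xs := by
  induction xs with
  | nil => intro acc x; simp [addNew]
  | cons y ys ih =>
      intro acc x
      simp only [addNew, List.foldl_cons]
      split_ifs with h
      · rw [show List.foldl (fun r x => if r.contains x = true then r else r ++ [x]) acc ys = addNew acc ys from rfl, ih]
        simp only [List.contains_iff_mem] at h
        simp only [List.mem_cons]
        constructor
        · tauto
        · rintro (ha | rfl | hy)
          exacts [Or.inl ha, Or.inl h, Or.inr hy]
      · rw [show List.foldl (fun r x => if r.contains x = true then r else r ++ [x]) (acc ++ [y]) ys = addNew (acc ++ [y]) ys from rfl, ih]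
        simp only [List.mem_append, List.mem_cons]
        tauto

theorem addNew_append (a b acc : List Int) :
    addNew acc (a ++ b) = addNew (addNew acc a) b := by
  simp [addNew, List.foldl_append]

-- nested index-building loops = one loop over the flattened (item, row-index) pair list
theorem buildIdx_flatten (L : List (Int × List Int)) :
    ∀ (d : PySem.Dict Int (List Int)),
      L.foldl (fun d p => p.2.foldl (fun d it => d.modify it [] (· ++ [p.1])) d) d
      = (L.flatMap (fun p => p.2.map (fun it => (it, p.1)))).foldl
          (fun d q => d.modify q.1 [] (· ++ [q.2])) d := by
  induction L with
  | nil => intro d; rfl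
  | cons x xs ih =>
      intro d
      rw [List.foldl_cons, List.flatMap_cons, List.foldl_append, ih, List.foldl_map]

-- characterization of the inverted index
theorem idx_mem (list2 : List (List Int)) (item : Int) (j : Int) :
    j ∈ (buildIdx list2).getD item [] ↔
      ∃ (k : Nat), ∃ (h : k < list2.length), j = (k : Int) ∧ item ∈ list2[k] := by
  unfold buildIdx
  rw [buildIdx_flatten]
  rw [PySem.Dict.getD_foldl_modify_append]
  simp only [PySem.Dict.getD_empty, List.nil_append, List.mem_map, List.mem_filter,
    List.mem_flatMap, PySem.List.mem_enumerate_iff, beq_iff_eq]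
  constructor
  · rintro ⟨⟨a, b⟩, ⟨⟨p, ⟨k, hk, hp⟩, hmem⟩, hb⟩, rfl⟩
    subst hp
    obtain ⟨it, hit, heq⟩ := hmem
    obtain ⟨rfl, rfl⟩ := Prod.mk.injEq .. ▸ heq
    subst hb
    exact ⟨k, hk, by simp, hit⟩
  · rintro ⟨k, hk, rfl, hmem⟩
    refine ⟨(item, ((0 : Int) + k)), ⟨⟨((0 : Int) + k, list2[k]), ⟨k, hk, rfl⟩, ?_⟩, rfl⟩, by simp⟩
    exact ⟨item, hmem, rfl⟩

theorem length_hitSet (L : List Int) : ∀ (h : List Bool),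
    (L.foldl (fun h j => h.set j.toNat true) h).length = h.length := by
  induction L with
  | nil => intro h; rfl
  | cons j js ih => intro h; rw [List.foldl_cons, ih, List.length_set]

theorem getD_hitSet (L : List Int) (hL : ∀ j ∈ L, 0 ≤ j) : ∀ (h : List Bool) (k : Nat), k < h.length →
    ((L.foldl (fun h j => h.set j.toNat true) h).getD k false = true ↔
      h.getD k false = true ∨ (k : Int) ∈ L) := by
  induction L with
  | nil => intro h k hk; simp
  | cons j js ih =>
      intro h k hk
      have hj : 0 ≤ j := hL j (by simp)
      have hL' : ∀ j ∈ js, 0 ≤ j := fun x hx => hL x (by simp [hx])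
      rw [List.foldl_cons, ih hL' _ k (by rw [List.length_set]; exact hk)]
      by_cases hkj : k = j.toNat
      · subst hkj
        have : (h.set j.toNat true).getD j.toNat false = true := by
          simp [List.getD, hk]
        rw [this]
        simp [Int.toNat_of_nonneg hj]
      · have : (h.set j.toNat true).getD k false = h.getD k false := by
          simp [List.getD, Ne.symm hkj]
        rw [this]
        have hne : (k : Int) ≠ j := by
          intro hkeq; apply hkj; omega
        simp only [List.mem_cons]
        tauto

-- the loop invariant tying B's (seen, merged, hit) to A's growing row l
def BInv (list2 : List (List Int)) (l : List Int) (st : List Int × List Int × List Bool) : Prop :=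
  st.1 = addNew [] l ∧ st.2.1 = addNew [] l ∧ st.2.2.length = list2.length ∧
  ∀ k : Nat, k < list2.length →
    (st.2.2.getD k false = true ↔ ∃ it ∈ l, it ∈ list2.getD k [])

theorem BInv_bAdd (list2 : List (List Int)) (l : List Int) (st : List Int × List Int × List Bool)
    (item : Int) (h : BInv list2 l st) : BInv list2 (l ++ [item]) (bAdd (buildIdx list2) st item) := by
  obtain ⟨h1, h2, h3, h4⟩ := h
  unfold bAdd
  by_cases hc : st.1.contains item = true
  · rw [if_pos hc]
    have hc' : (addNew [] l).contains item = true := h1 ▸ hc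
    have hil : item ∈ l := by
      have := List.contains_iff_mem.mp hc'
      simpa using (mem_addNew l [] item).mp this
    have hsame : addNew [] (l ++ [item]) = addNew [] l := by
      rw [addNew_append]
      show (if (addNew [] l).contains item = true then addNew [] l
            else addNew [] l ++ [item]) = addNew [] l
      rw [if_pos hc']
    refine ⟨by rw [h1, hsame], by rw [h2, hsame], h3, fun k hk => ?_⟩
    rw [h4 k hk]
    constructor
    · rintro ⟨it, hit, hm⟩; exact ⟨it, by simp [hit], hm⟩
    · rintro ⟨it, hit, hm⟩
      rcases List.mem_append.mp hit with hl | hr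
      · exact ⟨it, hl, hm⟩
      · simp only [List.mem_singleton] at hr
        exact ⟨item, hil, hr ▸ hm⟩
  · rw [if_neg hc]
    have hc' : ¬ (addNew [] l).contains item = true := h1 ▸ hc
    have hnil : item ∉ l := by
      intro hm; apply hc'
      exact List.contains_iff_mem.mpr ((mem_addNew l [] item).mpr (Or.inr hm))
    have hext : addNew [] (l ++ [item]) = addNew [] l ++ [item] := by
      rw [addNew_append]
      show (if (addNew [] l).contains item = true then addNew [] l
            else addNew [] l ++ [item]) = addNew [] l ++ [item]
      rw [if_neg hc']
    have hpos : ∀ j ∈ (buildIdx list2).getD item [], 0 ≤ j := by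
      intro j hj
      obtain ⟨k, hk, rfl, -⟩ := (idx_mem list2 item j).mp hj
      exact Int.natCast_nonneg k
    refine ⟨by rw [h1, hext], by rw [h2, hext], by rw [length_hitSet, h3], fun k hk => ?_⟩
    rw [getD_hitSet _ hpos _ k (h3 ▸ hk), h4 k hk, idx_mem]
    constructor
    · rintro (⟨it, hit, hm⟩ | ⟨k', hk', hkk, hmem⟩)
      · exact ⟨it, by simp [hit], hm⟩
      · have : k = k' := by exact_mod_cast hkk
        subst this
        exact ⟨item, by simp, by rwa [List.getD_eq_getElem _ _ hk]⟩
    · rintro ⟨it, hit, hm⟩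
      rcases List.mem_append.mp hit with hl | hr
      · exact Or.inl ⟨it, hl, hm⟩
      · simp only [List.mem_singleton] at hr
        subst hr
        exact Or.inr ⟨k, hk, rfl, by rwa [List.getD_eq_getElem _ _ hk] at hm⟩

theorem BInv_fold (list2 : List (List Int)) (xs : List Int) :
    ∀ (l : List Int) (st : List Int × List Int × List Bool), BInv list2 l st →
      BInv list2 (l ++ xs) (xs.foldl (bAdd (buildIdx list2)) st) := by
  induction xs with
  | nil => intro l st h; simpa using h
  | cons x xs ih =>
      intro l st h
      have := ih (l ++ [x]) _ (BInv_bAdd list2 l st x h)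
      simpa using this

-- A's per-row growing loop
def growA (list2 : List (List Int)) (l : List Int) : List Int :=
  list2.foldl (fun l1 lst2 =>
    if (lst2.map (fun i => l1.contains i)).any id then l1 ++ lst2 else l1) l

theorem loop_eq (list2 : List (List Int)) (n : Nat) : ∀ (k : Nat), k + n = list2.length →
    ∀ (l : List Int) (st : List Int × List Int × List Bool), BInv list2 l st →
    ((List.range' k n).foldl (fun st j =>
        if st.2.2.getD j false then (list2.getD j []).foldl (bAdd (buildIdx list2)) st else st) st).2.1
      = addNew [] ((list2.drop k).foldl (fun l1 lst2 =>
          if (lst2.map (fun i => l1.contains i)).any id then l1 ++ lst2 else l1) l) := by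
  induction n with
  | zero =>
      intro k hk l st h
      rw [List.drop_of_length_le (by omega)]
      exact h.2.1
  | succ n ih =>
      intro k hk l st h
      have hklt : k < list2.length := by omega
      rw [List.range'_succ, List.foldl_cons,
        List.drop_eq_getElem_cons hklt, List.foldl_cons]
      have hgetD : list2.getD k [] = list2[k] := List.getD_eq_getElem _ _ hklt
      have hcond : (st.2.2.getD k false = true) ↔
          ((list2[k].map (fun i => l.contains i)).any id = true) := by
        rw [h.2.2.2 k hklt, hgetD]
        simp only [List.any_map, List.any_eq_true, Function.comp_apply, id_eq]
        constructor
        · rintro ⟨it, h1, h2⟩; exact ⟨it, h2, by simpa using h1⟩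
        · rintro ⟨it, h1, h2⟩; exact ⟨it, by simpa using h2, h1⟩
      by_cases hb : st.2.2.getD k false = true
      · rw [if_pos hb, if_pos (hcond.mp hb)]
        have hinv : BInv list2 (l ++ list2[k]) ((list2.getD k []).foldl (bAdd (buildIdx list2)) st) := by
          rw [hgetD]; exact BInv_fold list2 _ l st h
        exact ih (k + 1) (by omega) _ _ hinv
      · rw [if_neg hb, if_neg (fun hc => hb (hcond.mpr hc))]
        exact ih (k + 1) (by omega) l st h

theorem foldl_snoc_map {α β : Type} (g : α → β) (L : List α) : ∀ (acc : List β),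
    L.foldl (fun m l => m ++ [g l]) acc = acc ++ L.map g := by
  induction L with
  | nil => intro acc; simp
  | cons x xs ih => intro acc; simp [ih]

theorem row_eq (list2 : List (List Int)) (lst1 : List Int) :
    ((List.range list2.length).foldl (fun st j =>
        if st.2.2.getD j false then (list2.getD j []).foldl (bAdd (buildIdx list2)) st else st)
      (lst1.foldl (bAdd (buildIdx list2)) ([], [], List.replicate list2.length false))).2.1
    = addNew [] (growA list2 lst1) := by
  have hinit : BInv list2 [] ([], [], List.replicate list2.length false) := by
    refine ⟨rfl, rfl, List.length_replicate, fun k hk => ?_⟩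
    simp [List.getD, hk]
  have h0 : BInv list2 lst1 (lst1.foldl (bAdd (buildIdx list2)) ([], [], List.replicate list2.length false)) := by
    have := BInv_fold list2 lst1 [] _ hinit
    simpa using this
  rw [List.range_eq_range']
  exact loop_eq list2 list2.length 0 (by omega) lst1 _ h0

-- ===== VERDICT =====
theorem mergeList_spec : Claim_equal_mergeList := by
  intro list1 list2 _
  unfold Spec_mergeList mergeList mergeList_alt
  by_cases h1 : list1.length == 0
  · simp [h1]
  · by_cases h2 : list2.length == 0
    · simp [h1, h2]
    · rw [if_neg h1, if_neg h1, if_neg h2, if_neg h2]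
      simp only []
      rw [foldl_snoc_map, foldl_snoc_map]
      simp only [List.nil_append]
      refine List.map_congr_left (fun lst1 _ => ?_)
      exact (row_eq list2 lst1).symm
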